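-- pv_equiv track=rewrite | github.com/moqingyan/object_reference_synthesis | prog2NL/src/template.py | describe_attrs
-- ===== SOURCE A (Python) =====
-- order = ["size", "color", "material", "shape"]
--
-- var_num = 3
--
-- def describe_attrs(prog):
--     description = {}
--     for i in range(var_num):
--         description[i] = []
--
--     for clause in prog:
--         if type(clause[1]) == str:
--             if clause[2] not in description.keys():
--                 description[clause[2]] = []
--             description[clause[2]].append((clause[0], clause[1]))
--
--     object_reference = {}
--     for i in range(var_num):
--         object_reference[i] = ""
--
--     for var, attrs in description.items():
--
--         has_shape = False
--
--         for o in order: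
--             for attr in attrs:
--                 if attr[0] == o:
--                     if o == "shape":
--                         has_shape = True
--                         object_reference[var]+=(attr[1])
--                     else:
--                         object_reference[var]+=(attr[1] + " ")
--
--
--         if not has_shape:
--             object_reference[var] += "object"
--
--
--
--     return object_reference
-- ===== SOURCE B (Python) =====
-- order = ["size", "color", "material", "shape"]
--
-- var_num = 3
--
-- def describe_attrs(prog):
--     variables = list(range(var_num))
--     for name, val, var in prog:
--         if isinstance(val, str) and var not in variables:
--             variables.append(var)
--     object_reference = {i: "" for i in range(var_num)}
--     for var in variables:
--         groups = {o: [] for o in order}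
--         for name, val, v in prog:
--             if isinstance(val, str) and v == var and name in groups:
--                 groups[name].append(val)
--         words = "".join(w + " " for o in order[:-1] for w in groups[o])
--         shapes = groups["shape"]
--         object_reference[var] += words + ("".join(shapes) if shapes else "object")
--     return object_reference
-- ===== Notes on version B (the rewrite author's own statement) =====
-- stated objective: alternative
-- what changed: B drops A's intermediate dict-of-attribute-lists and nested order-by-attrs scans: for each of the three variables it makes one grouping pass over the clauses into per-name buckets and joins the buckets directly in attribute order.
import Mathlib
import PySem

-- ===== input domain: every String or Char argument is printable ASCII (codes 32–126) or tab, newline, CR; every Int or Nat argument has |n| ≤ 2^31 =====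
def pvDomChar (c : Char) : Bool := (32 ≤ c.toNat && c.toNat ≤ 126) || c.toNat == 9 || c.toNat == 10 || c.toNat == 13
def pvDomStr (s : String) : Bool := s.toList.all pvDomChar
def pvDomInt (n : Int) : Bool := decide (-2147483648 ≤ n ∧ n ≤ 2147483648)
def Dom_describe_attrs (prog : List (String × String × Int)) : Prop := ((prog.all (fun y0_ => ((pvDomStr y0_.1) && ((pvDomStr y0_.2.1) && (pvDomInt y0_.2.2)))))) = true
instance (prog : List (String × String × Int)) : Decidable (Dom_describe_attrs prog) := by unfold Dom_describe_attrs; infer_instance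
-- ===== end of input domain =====

-- B replaces A's nested order×attrs scans and dict-of-lists staging by one grouping pass per
-- variable and a direct join in attribute order (objective: alternative; no speed claim).

-- ===== PORT A =====
-- module constants: order = ["size","color","material","shape"], var_num = 3
def pvOrder : List String := ["size", "color", "material", "shape"]
def pvVarNum : Int := 3

-- Port of A. 'type(clause[1]) == str' is always true on the typed domain (clause[1] : String).
-- 'object_reference[var] += x' is ported as insert var (getD var "" ++ x); under Pre_ the key is
-- always present so the default is never read (outside Pre_ the Python raises KeyError there).
def describe_attrs (prog : List (String × String × Int)) : List (Int × String) :=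
  let description : PySem.Dict Int (List (String × String)) :=
    (PySem.List.pyRange 0 pvVarNum 1).foldl (fun d i => d.insert i []) PySem.Dict.empty
  let description := prog.foldl (fun d clause =>
    let d := if d.contains clause.2.2 then d else d.insert clause.2.2 []
    d.modify clause.2.2 [] (fun l => l ++ [(clause.1, clause.2.1)])) description
  let objRef : PySem.Dict Int String :=
    (PySem.List.pyRange 0 pvVarNum 1).foldl (fun d i => d.insert i "") PySem.Dict.empty
  let objRef := description.items.foldl (fun d va =>
    let var := va.1
    let attrs := va.2
    let st := pvOrder.foldl (fun (st : PySem.Dict Int String × Bool) o =>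
      attrs.foldl (fun (st : PySem.Dict Int String × Bool) attr =>
        if attr.1 == o then
          if o == "shape" then
            (st.1.insert var (st.1.getD var "" ++ attr.2), true)
          else
            (st.1.insert var (st.1.getD var "" ++ attr.2 ++ " "), st.2)
        else st) st) (d, false)
    if !st.2 then st.1.insert var (st.1.getD var "" ++ "object") else st.1) objRef
  objRef.items

-- ===== PORT B =====
-- 'object_reference[var] += x' is ported as insert var (getD var "" ++ x), like in port A; under
-- Pre_ the key is always present (outside Pre_ the Python raises KeyError, exactly as A does).
def describe_attrs_alt (prog : List (String × String × Int)) : List (Int × String) :=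
  let varList : List Int := prog.foldl (fun vs c =>
    if vs.contains c.2.2 then vs else vs ++ [c.2.2]) (PySem.List.pyRange 0 pvVarNum 1)
  let objRef : PySem.Dict Int String :=
    PySem.Dict.ofList ((PySem.List.pyRange 0 pvVarNum 1).map (fun i => (i, "")))
  (varList.foldl (fun (result : PySem.Dict Int String) var =>
    let groups : PySem.Dict String (List String) :=
      PySem.Dict.ofList (pvOrder.map (fun o => (o, ([] : List String))))
    let groups := prog.foldl (fun g c =>
      if c.2.2 == var && g.contains c.1 then g.modify c.1 [] (fun l => l ++ [c.2.1]) else g) groups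
    let words := PySem.Str.join ""
      (((PySem.List.slice pvOrder none (some (-1))).flatMap (fun o => groups.getD o [])).map (fun w => w ++ " "))
    let shapes := groups.getD "shape" []
    result.insert var (result.getD var "" ++
      (words ++ (if shapes.isEmpty then "object" else PySem.Str.join "" shapes)))) objRef).items

-- ===== PRECONDITION & SPEC =====
-- Pre_ excludes programs containing a clause whose variable lies outside {0,1,2}: there A (and B)
-- raises KeyError (object_reference only has keys 0..var_num-1), so A returns no value.
def Pre_describe_attrs (prog : List (String × String × Int)) : Prop :=
  ∀ c ∈ prog, 0 ≤ c.2.2 ∧ c.2.2 < 3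
instance (prog : List (String × String × Int)) : Decidable (Pre_describe_attrs prog) := by
  unfold Pre_describe_attrs; infer_instance
def pvWitness_describe_attrs : (List (String × String × Int)) := [("size", "big", 0), ("shape", "cube", 2)]

def Spec_describe_attrs (prog : List (String × String × Int)) (out : List (Int × String)) : Prop := out = describe_attrs_alt prog
instance (prog : List (String × String × Int)) (out : List (Int × String)) : Decidable (Spec_describe_attrs prog out) := by unfold Spec_describe_attrs; infer_instance

-- ===== CLAIM (what is proved, stated in full; the proofs are below) =====
def Claim_equal_describe_attrs : Prop := ∀ (prog : List (String × String × Int)), Dom_describe_attrs prog → Pre_describe_attrs prog → Spec_describe_attrs prog (describe_attrs prog)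

-- ===== LEMMAS AND PROOFS =====

-- plain concatenation of a list of strings: the proofs' common normal form
def pvCat : List String → String
  | [] => ""
  | x :: l => x ++ pvCat l

theorem pvCat_append (a b : List String) : pvCat (a ++ b) = pvCat a ++ pvCat b := by
  induction a with
  | nil => simp [pvCat]
  | cons x t ih => simp [pvCat, ih, String.append_assoc]

theorem pv_intercalate_nil (l : List (List Char)) : List.intercalate [] l = l.flatten := by
  induction l with
  | nil => rfl
  | cons x t ih =>
    cases t with
    | nil => simp [List.intercalate, List.intersperse]
    | cons y u =>
      simp only [List.intercalate, List.intersperse] at *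
      simp_all

theorem pv_join_cons (x : String) (t : List String) :
    PySem.Str.join "" (x :: t) = x ++ PySem.Str.join "" t := by
  apply String.toList_injective ?_
  simp [PySem.Str.join, PySem.Chars.join, pv_intercalate_nil]

theorem pv_join_eq_pvCat (l : List String) : PySem.Str.join "" l = pvCat l := by
  induction l with
  | nil => decide
  | cons x t ih => rw [pv_join_cons, ih]; rfl

-- A's per-variable attribute-pair lists, B's per-name value lists, and the final string
def pvPairs (prog : List (String × String × Int)) (v : Int) : List (String × String) :=
  (prog.filter (fun c => c.2.2 == v)).map (fun c => (c.1, c.2.1))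
def pvAVals (attrs : List (String × String)) (o : String) : List String :=
  (attrs.filter (fun a => a.1 == o)).map (fun a => a.2)
def pvStrOf (attrs : List (String × String)) : String :=
  pvCat ((pvAVals attrs "size").map (· ++ " ")) ++ pvCat ((pvAVals attrs "color").map (· ++ " ")) ++
  pvCat ((pvAVals attrs "material").map (· ++ " ")) ++
  (if pvAVals attrs "shape" = [] then "object" else pvCat (pvAVals attrs "shape"))

theorem pv_insert_self (d : PySem.Dict Int String) (k : Int) (s : String)
    (hnd : d.keys.Nodup) (hg : d.get? k = some s) : d.insert k s = d := by
  apply PySem.Dict.ext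
  rw [PySem.Dict.items_insert_of_contains d s (by rw [PySem.Dict.contains_eq_isSome_get?, hg]; rfl)]
  conv_rhs => rw [← List.map_id d.items]
  apply List.map_congr_left
  intro p hp
  by_cases hpk : p.1 = k
  · have h2 : d.get? p.1 = some p.2 := PySem.Dict.get?_of_mem_items d (by simpa using hp) hnd
    rw [hpk, hg] at h2
    have : p = (k, s) := by
      obtain ⟨p1, p2⟩ := p
      simp_all
    simp [this]
  · simp [hpk]

-- A's description-building loop, on the seeded literal dict
theorem pv_descrA (prog : List (String × String × Int))
    (h : ∀ c ∈ prog, 0 ≤ c.2.2 ∧ c.2.2 < 3) (l0 l1 l2 : List (String × String)) :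
    prog.foldl (fun d clause =>
      let d := if d.contains clause.2.2 then d else d.insert clause.2.2 []
      d.modify clause.2.2 [] (fun l => l ++ [(clause.1, clause.2.1)]))
      (PySem.Dict.mk [(0, l0), (1, l1), (2, l2)])
    = PySem.Dict.mk [(0, l0 ++ pvPairs prog 0), (1, l1 ++ pvPairs prog 1), (2, l2 ++ pvPairs prog 2)] := by
  induction prog generalizing l0 l1 l2 with
  | nil => simp [pvPairs]
  | cons c t ih =>
    have hc := h c (by simp)
    have hv : c.2.2 = 0 ∨ c.2.2 = 1 ∨ c.2.2 = 2 := by omega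
    have ht : ∀ x ∈ t, 0 ≤ x.2.2 ∧ x.2.2 < 3 := fun x hx => h x (by simp [hx])
    rcases hv with hv | hv | hv <;> rw [List.foldl_cons, hv]
    · exact (ih ht (l0 ++ [(c.1, c.2.1)]) l1 l2).trans (by simp [pvPairs, hv])
    · exact (ih ht l0 (l1 ++ [(c.1, c.2.1)]) l2).trans (by simp [pvPairs, hv])
    · exact (ih ht l0 l1 (l2 ++ [(c.1, c.2.1)])).trans (by simp [pvPairs, hv])

-- A's inner attrs loop for one attribute name o
theorem pv_innerA (attrs : List (String × String)) (o : String) (var : Int)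
    (d : PySem.Dict Int String) (hs : Bool) (s : String)
    (hnd : d.keys.Nodup) (hg : d.get? var = some s) :
    attrs.foldl (fun (st : PySem.Dict Int String × Bool) attr =>
        if attr.1 == o then
          if o == "shape" then
            (st.1.insert var (st.1.getD var "" ++ attr.2), true)
          else
            (st.1.insert var (st.1.getD var "" ++ attr.2 ++ " "), st.2)
        else st) (d, hs)
    = (d.insert var (s ++ pvCat ((pvAVals attrs o).map (fun w => if o == "shape" then w else w ++ " "))),
       hs || (o == "shape" && attrs.any (fun a => a.1 == o))) := by
  induction attrs generalizing d hs s with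
  | nil =>
    simp [pvAVals, pvCat, pv_insert_self d var s hnd hg]
  | cons a t ih =>
    rw [List.foldl_cons]
    have hgd : d.getD var "" = s := PySem.Dict.getD_of_get?_eq_some d "" hg
    by_cases h1 : a.1 = o
    · by_cases ho : o = "shape"
      · have hstep : (if a.1 == o then
            if o == "shape" then (d.insert var (d.getD var "" ++ a.2), true)
            else (d.insert var (d.getD var "" ++ a.2 ++ " "), hs)
          else (d, hs)) = (d.insert var (s ++ a.2), true) := by
          simp [h1, ho, hgd]
        rw [hstep, ih (d.insert var (s ++ a.2)) true (s ++ a.2)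
          (PySem.Dict.nodup_keys_insert d var (s ++ a.2) hnd) (PySem.Dict.get?_insert_self d var (s ++ a.2)),
          PySem.Dict.insert_insert_self]
        simp [pvAVals, pvCat, h1, ho, String.append_assoc]
      · have hstep : (if a.1 == o then
            if o == "shape" then (d.insert var (d.getD var "" ++ a.2), true)
            else (d.insert var (d.getD var "" ++ a.2 ++ " "), hs)
          else (d, hs)) = (d.insert var (s ++ a.2 ++ " "), hs) := by
          simp [h1, ho, hgd]
        rw [hstep, ih (d.insert var (s ++ a.2 ++ " ")) hs (s ++ a.2 ++ " ")
          (PySem.Dict.nodup_keys_insert d var _ hnd) (PySem.Dict.get?_insert_self d var _),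
          PySem.Dict.insert_insert_self]
        have hob : (o == "shape") = false := beq_eq_false_iff_ne.mpr ho
        simp [pvAVals, pvCat, h1, hob, String.append_assoc]
    · have hstep : (if a.1 == o then
          if o == "shape" then (d.insert var (d.getD var "" ++ a.2), true)
          else (d.insert var (d.getD var "" ++ a.2 ++ " "), hs)
        else (d, hs)) = (d, hs) := by
        simp [h1]
      rw [hstep, ih d hs s hnd hg]
      have hab : (a.1 == o) = false := beq_eq_false_iff_ne.mpr h1
      simp [pvAVals, hab]

-- A's whole body for one (var, attrs) item of description
theorem pv_perVar (attrs : List (String × String)) (var : Int)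
    (d : PySem.Dict Int String) (s : String)
    (hnd : d.keys.Nodup) (hg : d.get? var = some s) :
    (if !(pvOrder.foldl (fun (st : PySem.Dict Int String × Bool) o =>
      attrs.foldl (fun (st : PySem.Dict Int String × Bool) attr =>
        if attr.1 == o then
          if o == "shape" then
            (st.1.insert var (st.1.getD var "" ++ attr.2), true)
          else
            (st.1.insert var (st.1.getD var "" ++ attr.2 ++ " "), st.2)
        else st) st) (d, false)).2
      then (pvOrder.foldl (fun (st : PySem.Dict Int String × Bool) o =>
      attrs.foldl (fun (st : PySem.Dict Int String × Bool) attr =>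
        if attr.1 == o then
          if o == "shape" then
            (st.1.insert var (st.1.getD var "" ++ attr.2), true)
          else
            (st.1.insert var (st.1.getD var "" ++ attr.2 ++ " "), st.2)
        else st) st) (d, false)).1.insert var
          ((pvOrder.foldl (fun (st : PySem.Dict Int String × Bool) o =>
      attrs.foldl (fun (st : PySem.Dict Int String × Bool) attr =>
        if attr.1 == o then
          if o == "shape" then
            (st.1.insert var (st.1.getD var "" ++ attr.2), true)
          else
            (st.1.insert var (st.1.getD var "" ++ attr.2 ++ " "), st.2)
        else st) st) (d, false)).1.getD var "" ++ "object")
      else (pvOrder.foldl (fun (st : PySem.Dict Int String × Bool) o =>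
      attrs.foldl (fun (st : PySem.Dict Int String × Bool) attr =>
        if attr.1 == o then
          if o == "shape" then
            (st.1.insert var (st.1.getD var "" ++ attr.2), true)
          else
            (st.1.insert var (st.1.getD var "" ++ attr.2 ++ " "), st.2)
        else st) st) (d, false)).1)
    = d.insert var (s ++ pvStrOf attrs) := by
  show (let st := ("size" :: "color" :: "material" :: "shape" :: []).foldl _ (d, false)
        if !st.2 then st.1.insert var (st.1.getD var "" ++ "object") else st.1) = _
  simp only [List.foldl_cons, List.foldl_nil]
  rw [pv_innerA attrs "size" var d false s hnd hg]
  rw [pv_innerA attrs "color" var _ _ _ (PySem.Dict.nodup_keys_insert d var _ hnd)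
    (PySem.Dict.get?_insert_self d var _)]
  rw [PySem.Dict.insert_insert_self]
  rw [pv_innerA attrs "material" var _ _ _ (PySem.Dict.nodup_keys_insert d var _ hnd)
    (PySem.Dict.get?_insert_self d var _)]
  rw [PySem.Dict.insert_insert_self]
  rw [pv_innerA attrs "shape" var _ _ _ (PySem.Dict.nodup_keys_insert d var _ hnd)
    (PySem.Dict.get?_insert_self d var _)]
  rw [PySem.Dict.insert_insert_self]
  simp only [show ("size" == "shape") = false from rfl, show ("color" == "shape") = false from rfl,
    show ("material" == "shape") = false from rfl, show ("shape" == "shape") = true from rfl,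
    Bool.false_and, Bool.or_false, Bool.false_or, Bool.true_and, if_true]
  by_cases hsh : attrs.any (fun a => a.1 == "shape") = true
  · rw [hsh]
    have hne : pvAVals attrs "shape" ≠ [] := by
      simp only [List.any_eq_true] at hsh
      obtain ⟨a, ha, hao⟩ := hsh
      simp only [pvAVals, ne_eq, List.map_eq_nil_iff, List.filter_eq_nil_iff]
      intro h
      exact absurd hao (by simpa using h a ha)
    simp [pvStrOf, hne, String.append_assoc]
  · simp only [Bool.not_eq_true] at hsh
    rw [hsh]
    have hnil : pvAVals attrs "shape" = [] := by
      simp only [List.any_eq_false] at hsh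
      simp only [pvAVals, List.map_eq_nil_iff, List.filter_eq_nil_iff]
      intro a ha
      simpa using hsh a ha
    simp only [Bool.not_false, if_true]
    rw [PySem.Dict.getD_of_get?_eq_some _ "" (PySem.Dict.get?_insert_self d var _),
      PySem.Dict.insert_insert_self]
    simp [pvStrOf, hnil, pvCat, String.append_assoc]

-- B's grouping loop for one variable, on the seeded literal dict
theorem pv_groupsB (prog : List (String × String × Int)) (var : Int)
    (ls lc lm lsh : List String) :
    prog.foldl (fun g c =>
      if c.2.2 == var && g.contains c.1 then g.modify c.1 [] (fun l => l ++ [c.2.1]) else g)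
      (PySem.Dict.mk [("size", ls), ("color", lc), ("material", lm), ("shape", lsh)])
    = PySem.Dict.mk [("size", ls ++ pvAVals (pvPairs prog var) "size"),
        ("color", lc ++ pvAVals (pvPairs prog var) "color"),
        ("material", lm ++ pvAVals (pvPairs prog var) "material"),
        ("shape", lsh ++ pvAVals (pvPairs prog var) "shape")] := by
  induction prog generalizing ls lc lm lsh with
  | nil => simp [pvPairs, pvAVals]
  | cons c t ih =>
    rw [List.foldl_cons]
    by_cases hv : c.2.2 = var
    case neg =>
      have hstep : (if c.2.2 == var && (PySem.Dict.mk [("size", ls), ("color", lc), ("material", lm), ("shape", lsh)]).contains c.1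
          then (PySem.Dict.mk [("size", ls), ("color", lc), ("material", lm), ("shape", lsh)]).modify c.1 [] (fun l => l ++ [c.2.1])
          else PySem.Dict.mk [("size", ls), ("color", lc), ("material", lm), ("shape", lsh)])
          = PySem.Dict.mk [("size", ls), ("color", lc), ("material", lm), ("shape", lsh)] := by
        simp [hv]
      rw [hstep, ih]
      simp [pvPairs, pvAVals, hv]
    case pos =>
      have hstep : (if c.2.2 == var && (PySem.Dict.mk [("size", ls), ("color", lc), ("material", lm), ("shape", lsh)]).contains c.1
          then (PySem.Dict.mk [("size", ls), ("color", lc), ("material", lm), ("shape", lsh)]).modify c.1 [] (fun l => l ++ [c.2.1])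
          else PySem.Dict.mk [("size", ls), ("color", lc), ("material", lm), ("shape", lsh)])
          = PySem.Dict.mk [("size", ls ++ pvAVals [(c.1, c.2.1)] "size"),
              ("color", lc ++ pvAVals [(c.1, c.2.1)] "color"),
              ("material", lm ++ pvAVals [(c.1, c.2.1)] "material"),
              ("shape", lsh ++ pvAVals [(c.1, c.2.1)] "shape")] := by
        by_cases h1 : c.1 = "size"
        · simp [hv, h1, pvAVals, PySem.Dict.contains, PySem.Dict.modify, PySem.Dict.getD, PySem.Dict.get?, PySem.Dict.insert]
        by_cases h2 : c.1 = "color"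
        · simp [hv, h2, pvAVals, PySem.Dict.contains, PySem.Dict.modify, PySem.Dict.getD, PySem.Dict.get?, PySem.Dict.insert]
        by_cases h3 : c.1 = "material"
        · simp [hv, h3, pvAVals, PySem.Dict.contains, PySem.Dict.modify, PySem.Dict.getD, PySem.Dict.get?, PySem.Dict.insert]
        by_cases h4 : c.1 = "shape"
        · simp [hv, h4, pvAVals, PySem.Dict.contains, PySem.Dict.modify, PySem.Dict.getD, PySem.Dict.get?, PySem.Dict.insert]
        · simp [hv, pvAVals, PySem.Dict.contains, Ne.symm h1, Ne.symm h2, Ne.symm h3, Ne.symm h4, h1, h2, h3, h4]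
      rw [hstep, ih]
      simp [pvPairs, pvAVals, hv, List.filter_cons]
      refine ⟨?_, ?_, ?_, ?_⟩ <;> split_ifs <;> simp

-- both programs reduce to the same normal form
theorem pv_A_norm (prog : List (String × String × Int)) (h : Pre_describe_attrs prog) :
    describe_attrs prog
    = [(0, pvStrOf (pvPairs prog 0)), (1, pvStrOf (pvPairs prog 1)), (2, pvStrOf (pvPairs prog 2))] := by
  simp only [describe_attrs]
  rw [show (PySem.List.pyRange 0 pvVarNum 1).foldl
      (fun (d : PySem.Dict Int (List (String × String))) i => d.insert i []) PySem.Dict.empty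
      = PySem.Dict.mk [(0, []), (1, []), (2, [])] from rfl]
  rw [pv_descrA prog h [] [] []]
  rw [show (PySem.List.pyRange 0 pvVarNum 1).foldl
      (fun (d : PySem.Dict Int String) i => d.insert i "") PySem.Dict.empty
      = PySem.Dict.mk [(0, ""), (1, ""), (2, "")] from rfl]
  simp only [List.nil_append]
  simp only [List.foldl_cons, List.foldl_nil]
  rw [pv_perVar (pvPairs prog 0) 0 (PySem.Dict.mk [(0, ""), (1, ""), (2, "")]) "" (by decide) (by rfl)]
  rw [pv_perVar (pvPairs prog 1) 1 _ ""
    (PySem.Dict.nodup_keys_insert _ _ _ (by decide)) (by rfl)]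
  rw [pv_perVar (pvPairs prog 2) 2 _ ""
    (PySem.Dict.nodup_keys_insert _ _ _ (PySem.Dict.nodup_keys_insert _ _ _ (by decide))) (by rfl)]
  simp [PySem.Dict.insert, PySem.Dict.contains]

-- B's variables list stays [0, 1, 2] under Pre_
theorem pv_varsB (prog : List (String × String × Int))
    (h : ∀ c ∈ prog, 0 ≤ c.2.2 ∧ c.2.2 < 3) :
    prog.foldl (fun vs c => if vs.contains c.2.2 then vs else vs ++ [c.2.2]) [(0 : Int), 1, 2]
    = [(0 : Int), 1, 2] := by
  induction prog with
  | nil => rfl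
  | cons c t ih =>
    have hc := h c (by simp)
    have hv : c.2.2 = 0 ∨ c.2.2 = 1 ∨ c.2.2 = 2 := by omega
    have hm : ([(0 : Int), 1, 2].contains c.2.2) = true := by
      rcases hv with hv | hv | hv <;> simp [hv]
    rw [List.foldl_cons, if_pos hm]
    exact ih (fun x hx => h x (by simp [hx]))

theorem pv_B_norm (prog : List (String × String × Int)) (h : Pre_describe_attrs prog) :
    describe_attrs_alt prog
    = [(0, pvStrOf (pvPairs prog 0)), (1, pvStrOf (pvPairs prog 1)), (2, pvStrOf (pvPairs prog 2))] := by
  simp only [describe_attrs_alt]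
  rw [show PySem.List.pyRange 0 pvVarNum 1 = [(0:Int), 1, 2] from rfl]
  rw [pv_varsB prog h]
  rw [show PySem.Dict.ofList ([(0:Int), 1, 2].map (fun i => (i, "")))
      = PySem.Dict.mk [(0, ""), (1, ""), (2, "")] from rfl]
  rw [show PySem.Dict.ofList (pvOrder.map (fun o => (o, ([] : List String))))
      = PySem.Dict.mk [("size", []), ("color", []), ("material", []), ("shape", [])] from rfl]
  simp only [List.foldl_cons, List.foldl_nil]
  rw [pv_groupsB prog 0 [] [] [] [], pv_groupsB prog 1 [] [] [] [], pv_groupsB prog 2 [] [] [] []]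
  rw [show PySem.List.slice pvOrder none (some (-1)) = ["size", "color", "material"] from rfl]
  simp [PySem.Dict.getD, PySem.Dict.get?, PySem.Dict.insert, PySem.Dict.contains,
    List.map_append, pv_join_eq_pvCat, pvCat_append, pvStrOf,
    List.isEmpty_iff, String.append_assoc]

-- ===== VERDICT (by name: the statement is the Claim_ definition above) =====
theorem describe_attrs_spec : Claim_equal_describe_attrs := by
  intro prog _ hPre
  unfold Spec_describe_attrs
  rw [pv_A_norm prog hPre, pv_B_norm prog hPre]
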